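-- pv_equiv track=rewrite | github.com/sudiptap/algods | ds_algo/patterns/dynamic_programming/03_unbounded_knapsack/solutions/3592-inverse-coin-change.py | inverseCoinChange
-- ===== SOURCE A (Python) =====
-- from typing import List
--
-- def inverseCoinChange(dp_array: List[int]) -> List[int]:
--     n = len(dp_array)
--     if n == 0:
--         return []
--     if dp_array[0] != 0:
--         return []
--
--     # Find candidate coins: positions where dp[d] == 1
--     coins = []
--     for d in range(1, n):
--         if dp_array[d] == 1:
--             coins.append(d)
--
--     # Verify by recomputing dp
--     recomputed = [0] + [float('inf')] * (n - 1)
--     for i in range(1, n):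
--         for c in coins:
--             if c <= i and recomputed[i - c] != float('inf'):
--                 recomputed[i] = min(recomputed[i], recomputed[i - c] + 1)
--
--     for i in range(n):
--         expected = dp_array[i]
--         got = recomputed[i] if recomputed[i] != float('inf') else -1
--         if expected != got:
--             return []  # No valid coin set
--
--     return coins
-- ===== SOURCE B (Python) =====
-- from typing import List
--
-- def inverseCoinChange(dp_array: List[int]) -> List[int]:
--     # Certificate verification: instead of recomputing the DP table, check the
--     # shortest-path optimality conditions of dp_array directly:
--     # (relax) every edge i -> i+c leaving a reachable amount is relaxed, and
--     # (tight) every reachable amount >= 1 attains its value through some coin.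
--     n = len(dp_array)
--     if n == 0 or dp_array[0] != 0:
--         return []
--     coins = [d for d in range(1, n) if dp_array[d] == 1]
--     for i in range(n):
--         if dp_array[i] != -1:
--             for c in coins:
--                 j = i + c
--                 if j < n and (dp_array[j] == -1 or dp_array[j] > dp_array[i] + 1):
--                     return []
--     for i in range(1, n):
--         if dp_array[i] != -1 and not any(
--                 c <= i and dp_array[i - c] != -1 and dp_array[i - c] + 1 == dp_array[i]
--                 for c in coins):
--             return []
--     return coins
-- ===== Notes on version B (the rewrite author's own statement) =====
-- stated objective: alternative
-- what changed: B verifies dp_array by shortest-path optimality certificates instead of recomputing the DP table: a forward edge-relaxation pass (every edge i -> i+c out of a reachable amount satisfies dp[i+c] != -1 and dp[i+c] <= dp[i]+1) plus a tightness pass (every reachable amount >= 1 attains its value through some coin), computing no min and maintaining no auxiliary array.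
import Mathlib
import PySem

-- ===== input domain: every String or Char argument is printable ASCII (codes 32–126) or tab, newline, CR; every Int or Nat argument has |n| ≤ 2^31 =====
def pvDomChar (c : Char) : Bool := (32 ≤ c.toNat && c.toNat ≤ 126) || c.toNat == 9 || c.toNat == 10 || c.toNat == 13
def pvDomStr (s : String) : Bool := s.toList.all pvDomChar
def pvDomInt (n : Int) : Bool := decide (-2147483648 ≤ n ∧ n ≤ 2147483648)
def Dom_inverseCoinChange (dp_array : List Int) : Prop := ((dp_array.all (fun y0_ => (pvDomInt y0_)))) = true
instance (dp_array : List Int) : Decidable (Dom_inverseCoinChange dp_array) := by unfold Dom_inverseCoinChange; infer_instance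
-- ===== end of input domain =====

-- B replaces A's DP recomputation by a certificate check of dp_array itself: a forward
-- edge-relaxation pass plus a tightness-witness pass, computing no min and no auxiliary
-- table (objective: alternative).

-- ===== PORT A =====
-- recomputed : List (Option Int); `none` stands for Python's float('inf'), faithful since
-- every non-inf entry is an int.  All list indices A uses are provably in range, so getD is exact.
def pvGot : Option Int → Int
  | some v => v
  | none => -1

-- min(recomputed[i], x) where recomputed[i] may be inf
def pvInfMin : Option Int → Int → Option Int
  | none, x => some x
  | some a, x => some (min a x)

-- body of `for c in coins:` at fixed i (the `.toNat` is exact: it is guarded by c ≤ i, and i ≥ 0)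
def pvInnerA (i : Int) (r : List (Option Int)) (c : Int) : List (Option Int) :=
  if c ≤ i ∧ r.getD (i - c).toNat none ≠ none then
    r.set i.toNat (pvInfMin (r.getD i.toNat none) (pvGot (r.getD (i - c).toNat none) + 1))
  else r

-- `for i in range(n): … if expected != got: return []` (early return transliterated as recursion)
def pvCheckA (dp : List Int) (rec : List (Option Int)) (coins : List Int) : List Int → List Int
  | [] => coins
  | i :: rest =>
    if dp.getD i.toNat 0 ≠ pvGot (rec.getD i.toNat none) then []
    else pvCheckA dp rec coins rest

def inverseCoinChange (dp_array : List Int) : List Int :=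
  let n := dp_array.length
  if n = 0 then [] else
  if dp_array.getD 0 0 ≠ 0 then [] else
  let coins := (PySem.List.pyRange 1 n 1).foldl
      (fun acc d => if dp_array.getD d.toNat 0 = 1 then acc ++ [d] else acc) []
  let recomputed := (PySem.List.pyRange 1 n 1).foldl
      (fun r i => coins.foldl (pvInnerA i) r)
      (some 0 :: List.replicate (n - 1) none)
  pvCheckA dp_array recomputed coins (PySem.List.pyRange 0 n 1)

-- ===== PORT B =====
-- `j < n and (dp[j] == -1 or dp[j] > dp[i] + 1)`: a violated edge i -> i+c
def pvViolB (dp : List Int) (n : Int) (i c : Int) : Bool :=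
  let j := i + c
  decide (j < n) && ((dp.getD j.toNat 0 == -1) || decide (dp.getD j.toNat 0 > dp.getD i.toNat 0 + 1))

-- relax pass `for i in range(n): …` (early `return []` transliterated as recursion;
-- the inner `for c in coins: … return []` is the early-exit scan `cs.any`)
def pvRelaxB (dp cs : List Int) (n : Int) : List Int → Bool
  | [] => true
  | i :: rest =>
    if (dp.getD i.toNat 0 != -1) && cs.any (fun c => pvViolB dp n i c) then false
    else pvRelaxB dp cs n rest

-- `any(c <= i and dp[i-c] != -1 and dp[i-c] + 1 == dp[i] for c in coins)`
def pvHasWitB (dp cs : List Int) (i : Int) : Bool :=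
  cs.any (fun c =>
    decide (c ≤ i) && (dp.getD (i - c).toNat 0 != -1) &&
      (dp.getD (i - c).toNat 0 + 1 == dp.getD i.toNat 0))

-- tightness pass `for i in range(1, n): …`
def pvTightB (dp cs : List Int) : List Int → Bool
  | [] => true
  | i :: rest =>
    if (dp.getD i.toNat 0 != -1) && !(pvHasWitB dp cs i) then false
    else pvTightB dp cs rest

def inverseCoinChange_alt (dp_array : List Int) : List Int :=
  let n := dp_array.length
  if n = 0 ∨ dp_array.getD 0 0 ≠ 0 then [] else
  let coins := (PySem.List.pyRange 1 n 1).filter (fun d => decide (dp_array.getD d.toNat 0 = 1))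
  if pvRelaxB dp_array coins n (PySem.List.pyRange 0 n 1) then
    if pvTightB dp_array coins (PySem.List.pyRange 1 n 1) then coins else []
  else []

-- ===== PRECONDITION & SPEC =====
def Spec_inverseCoinChange (dp_array : List Int) (out : List Int) : Prop := out = inverseCoinChange_alt dp_array
instance (dp_array : List Int) (out : List Int) : Decidable (Spec_inverseCoinChange dp_array out) := by unfold Spec_inverseCoinChange; infer_instance

-- ===== CLAIM (what is proved, stated in full; the proofs are below) =====
def Claim_equal_inverseCoinChange : Prop := ∀ (dp_array : List Int), Dom_inverseCoinChange dp_array → Spec_inverseCoinChange dp_array (inverseCoinChange dp_array)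

-- ===== LEMMAS AND PROOFS =====

-- g-view of the recomputed array (value, with -1 for inf)
def pvG (r : List (Option Int)) (j : Nat) : Int := pvGot (r.getD j none)

-- the coin-change recurrence, over an abstract value table h
def pvBest (h : Nat → Int) (cs : List Int) (i : Nat) : Int :=
  match PySem.List.min? (cs.filterMap (fun c =>
    if c ≤ (i : Int) ∧ h ((i : Int) - c).toNat ≠ -1
    then some (h ((i : Int) - c).toNat + 1) else none)) (fun x => x) with
  | some m => m
  | none => -1

theorem pvBest_congr (h h' : Nat → Int) (cs : List Int) (i : Nat)
    (hcs : ∀ c ∈ cs, 1 ≤ c) (hagree : ∀ t, t < i → h t = h' t) :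
    pvBest h cs i = pvBest h' cs i := by
  unfold pvBest
  have : cs.filterMap (fun c =>
      if c ≤ (i : Int) ∧ h ((i : Int) - c).toNat ≠ -1 then some (h ((i : Int) - c).toNat + 1) else none)
      = cs.filterMap (fun c =>
      if c ≤ (i : Int) ∧ h' ((i : Int) - c).toNat ≠ -1 then some (h' ((i : Int) - c).toNat + 1) else none) := by
    refine List.filterMap_congr (fun c hc => ?_)
    by_cases hle : c ≤ (i : Int)
    · have h1 : 1 ≤ c := hcs c hc
      have hidx : ((i : Int) - c).toNat < i := by omega
      rw [hagree _ hidx]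
    · simp [hle]
  rw [this]

theorem foldl_infMin_some (t : List Int) (a : Int) :
    t.foldl pvInfMin (some a) = some (t.foldl min a) := by
  induction t generalizing a with
  | nil => rfl
  | cons x xs ih => simp [List.foldl, pvInfMin, ih]

theorem foldl_infMin_eq_min? (l : List Int) :
    l.foldl pvInfMin none = PySem.List.min? l (fun x => x) := by
  cases l with
  | nil => rfl
  | cons x t => simp [List.foldl, pvInfMin, foldl_infMin_some, PySem.List.min?_id_cons]

-- the inner `for c in coins` loop sets position i to the running min of the candidate values
theorem innerA_eq_set (cs : List Int) (r : List (Option Int)) (i : Nat)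
    (hlen : i < r.length) (hcs : ∀ c ∈ cs, 1 ≤ c) :
    cs.foldl (pvInnerA (i : Int)) r =
      r.set i ((cs.filterMap (fun c =>
        if c ≤ (i : Int) ∧ r.getD ((i : Int) - c).toNat none ≠ none
        then some (pvGot (r.getD ((i : Int) - c).toNat none) + 1) else none)).foldl
          pvInfMin (r.getD i none)) := by
  induction cs generalizing r with
  | nil =>
      simp only [List.foldl, List.filterMap]
      rw [List.getD_eq_getElem?_getD, List.getElem?_eq_getElem hlen]
      simp
  | cons c cs' ih =>
      have h1 : 1 ≤ c := hcs c (by simp)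
      have hcs' : ∀ x ∈ cs', 1 ≤ x := fun x hx => hcs x (by simp [hx])
      by_cases hc : c ≤ (i : Int) ∧ r.getD ((i : Int) - c).toNat none ≠ none
      · have hstep : pvInnerA (i : Int) r c =
            r.set i (pvInfMin (r.getD i none) (pvGot (r.getD ((i : Int) - c).toNat none) + 1)) := by
          unfold pvInnerA
          rw [if_pos hc]
          simp
        set v := pvGot (r.getD ((i : Int) - c).toNat none) + 1 with hv
        set r' := r.set i (pvInfMin (r.getD i none) v) with hr'
        have hlen' : i < r'.length := by simpa [hr'] using hlen
        have hne : ∀ j : Nat, j ≠ i → r'.getD j none = r.getD j none := by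
          intro j hj
          simp [hr', List.getD_eq_getElem?_getD, List.getElem?_set_ne (Ne.symm hj)]
        have hfil : cs'.filterMap (fun c' =>
            if c' ≤ (i : Int) ∧ r'.getD ((i : Int) - c').toNat none ≠ none
            then some (pvGot (r'.getD ((i : Int) - c').toNat none) + 1) else none)
            = cs'.filterMap (fun c' =>
            if c' ≤ (i : Int) ∧ r.getD ((i : Int) - c').toNat none ≠ none
            then some (pvGot (r.getD ((i : Int) - c').toNat none) + 1) else none) := by
          refine List.filterMap_congr (fun c' hc' => ?_)
          by_cases hle : c' ≤ (i : Int)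
          · have h1' : 1 ≤ c' := hcs' c' hc'
            have : ((i : Int) - c').toNat ≠ i := by omega
            rw [hne _ this]
          · simp [hle]
        have hri' : r'.getD i none = pvInfMin (r.getD i none) v := by
          simp [hr', List.getD_eq_getElem?_getD, List.getElem?_set_self hlen]
        calc (c :: cs').foldl (pvInnerA (i : Int)) r
            = cs'.foldl (pvInnerA (i : Int)) r' := by rw [List.foldl_cons, hstep]
          _ = r'.set i ((cs'.filterMap (fun c' =>
                if c' ≤ (i : Int) ∧ r'.getD ((i : Int) - c').toNat none ≠ none
                then some (pvGot (r'.getD ((i : Int) - c').toNat none) + 1) else none)).foldl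
                  pvInfMin (r'.getD i none)) := ih r' hlen' hcs'
          _ = _ := by
                rw [hfil, hri', hr', List.set_set]
                have : (c :: cs').filterMap (fun c' =>
                    if c' ≤ (i : Int) ∧ r.getD ((i : Int) - c').toNat none ≠ none
                    then some (pvGot (r.getD ((i : Int) - c').toNat none) + 1) else none)
                    = v :: cs'.filterMap (fun c' =>
                    if c' ≤ (i : Int) ∧ r.getD ((i : Int) - c').toNat none ≠ none
                    then some (pvGot (r.getD ((i : Int) - c').toNat none) + 1) else none) := by
                  rw [List.filterMap_cons, if_pos hc]
                rw [this, List.foldl_cons]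
      · have hstep : pvInnerA (i : Int) r c = r := by
          simp only [pvInnerA, if_neg hc]
        have : (c :: cs').filterMap (fun c' =>
            if c' ≤ (i : Int) ∧ r.getD ((i : Int) - c').toNat none ≠ none
            then some (pvGot (r.getD ((i : Int) - c').toNat none) + 1) else none)
            = cs'.filterMap (fun c' =>
            if c' ≤ (i : Int) ∧ r.getD ((i : Int) - c').toNat none ≠ none
            then some (pvGot (r.getD ((i : Int) - c').toNat none) + 1) else none) := by
          rw [List.filterMap_cons, if_neg hc]
        rw [List.foldl_cons, hstep, this]
        exact ih r hlen hcs'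

-- the invariant carried along A's outer `for i in range(1, n)` loop
def pvInv (n : Nat) (cs : List Int) (m : Nat) (r : List (Option Int)) : Prop :=
  r.length = n ∧
  (∀ j : Nat, j < n → m < j → r.getD j none = none) ∧
  r.getD 0 none = some 0 ∧
  (∀ j v, r.getD j none = some v → 0 ≤ v) ∧
  (∀ j : Nat, 1 ≤ j → j ≤ m → pvG r j = pvBest (pvG r) cs j)

theorem pvInv_step (n : Nat) (cs : List Int) (m : Nat) (r : List (Option Int))
    (hcs : ∀ c ∈ cs, 1 ≤ c) (hinv : pvInv n cs m r) (hm : m + 1 < n) :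
    pvInv n cs (m + 1) (cs.foldl (pvInnerA ((m : Int) + 1)) r) := by
  obtain ⟨hlenr, hnone, h0, hnn, hrec⟩ := hinv
  have hcast : ((m : Int) + 1) = (((m + 1 : Nat)) : Int) := by push_cast; ring
  have hlt : m + 1 < r.length := by omega
  have hstart : r.getD (m + 1) none = none := hnone (m + 1) (by omega) (by omega)
  set cands := cs.filterMap (fun c =>
      if c ≤ ((m + 1 : Nat) : Int) ∧ r.getD (((m + 1 : Nat) : Int) - c).toNat none ≠ none
      then some (pvGot (r.getD (((m + 1 : Nat) : Int) - c).toNat none) + 1) else none) with hcands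
  have heq : cs.foldl (pvInnerA ((m : Int) + 1)) r =
      r.set (m + 1) (PySem.List.min? cands (fun x => x)) := by
    rw [hcast, innerA_eq_set cs r (m + 1) hlt hcs, hstart, foldl_infMin_eq_min?]
  rw [heq]
  set o := PySem.List.min? cands (fun x => x) with ho
  have hgetne : ∀ j : Nat, j ≠ m + 1 → (r.set (m + 1) o).getD j none = r.getD j none := by
    intro j hj
    simp [List.getD_eq_getElem?_getD, List.getElem?_set_ne (Ne.symm hj)]
  have hgeti : (r.set (m + 1) o).getD (m + 1) none = o := by
    simp [List.getD_eq_getElem?_getD, List.getElem?_set_self hlt]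
  have hcand1 : ∀ x ∈ cands, 1 ≤ x := by
    intro x hx
    rw [hcands] at hx
    rcases List.mem_filterMap.mp hx with ⟨c, _, hfc⟩
    by_cases hcond : c ≤ ((m + 1 : Nat) : Int) ∧ r.getD (((m + 1 : Nat) : Int) - c).toNat none ≠ none
    · rw [if_pos hcond] at hfc
      rcases hw : r.getD (((m + 1 : Nat) : Int) - c).toNat none with _ | w
      · exact absurd hw hcond.2
      · have := hnn _ _ hw
        rw [hw] at hfc
        have hx : w + 1 = x := by simpa [pvGot] using hfc
        omega
    · rw [if_neg hcond] at hfc; exact absurd hfc (by simp)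
  have hagree : ∀ t, t < m + 1 → pvG (r.set (m + 1) o) t = pvG r t := by
    intro t ht
    unfold pvG
    rw [hgetne t (by omega)]
  refine ⟨by simpa using hlenr, ?_, ?_, ?_, ?_⟩
  · intro j hj hmj
    rw [hgetne j (by omega)]
    exact hnone j hj (by omega)
  · rw [hgetne 0 (by omega)]; exact h0
  · intro j v hjv
    by_cases hj : j = m + 1
    · subst hj
      rw [hgeti] at hjv
      have := hcand1 v (PySem.List.min?_mem (ho ▸ hjv))
      omega
    · exact hnn j v (by rwa [hgetne j hj] at hjv)
  · intro j hj1 hjm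
    by_cases hj : j = m + 1
    · subst hj
      have hG : pvG (r.set (m + 1) o) (m + 1) = pvGot o := by unfold pvG; rw [hgeti]
      have hbestr : pvBest (pvG r) cs (m + 1) = pvGot o := by
        unfold pvBest
        have : cs.filterMap (fun c =>
            if c ≤ ((m + 1 : Nat) : Int) ∧ pvG r (((m + 1 : Nat) : Int) - c).toNat ≠ -1
            then some (pvG r (((m + 1 : Nat) : Int) - c).toNat + 1) else none) = cands := by
          rw [hcands]
          refine List.filterMap_congr (fun c _ => ?_)
          by_cases hle : c ≤ ((m + 1 : Nat) : Int)
          · rcases hw : r.getD (((m + 1 : Nat) : Int) - c).toNat none with _ | w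
            · have hA : ¬(c ≤ ((m + 1 : Nat) : Int) ∧ pvG r (((m + 1 : Nat) : Int) - c).toNat ≠ -1) :=
                fun h => h.2 (by unfold pvG; rw [hw]; rfl)
              rw [if_neg hA, if_neg (fun h => h.2 rfl)]
            · have hw0 := hnn _ _ hw
              have hne1 : pvG r (((m + 1 : Nat) : Int) - c).toNat ≠ -1 := by
                unfold pvG
                rw [hw]
                simp only [pvGot]
                omega
              rw [if_pos ⟨hle, hne1⟩, if_pos ⟨hle, by simp⟩]
              unfold pvG
              rw [hw]
          · rw [if_neg (fun h => hle h.1), if_neg (fun h => hle h.1)]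
        rw [this, ← ho]
        cases o <;> simp [pvGot]
      rw [hG, ← hbestr]
      exact (pvBest_congr (pvG r) (pvG (r.set (m + 1) o)) cs (m + 1) hcs
        (fun t ht => (hagree t ht).symm))
    · have hjm' : j ≤ m := by omega
      rw [pvG, hgetne j hj, ← pvG]
      rw [hrec j hj1 hjm']
      exact (pvBest_congr (pvG r) (pvG (r.set (m + 1) o)) cs j hcs
        (fun t ht => (hagree t (by omega)).symm))

theorem pvInv_outer (n : Nat) (cs : List Int) (hcs : ∀ c ∈ cs, 1 ≤ c) (hn : 0 < n) :
    ∀ m : Nat, m < n →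
      pvInv n cs m ((PySem.List.pyRange 1 ((m : Int) + 1) 1).foldl
        (fun r i => cs.foldl (pvInnerA i) r)
        (some 0 :: List.replicate (n - 1) none)) := by
  intro m
  induction m with
  | zero =>
      intro _
      rw [show ((0 : Nat) : Int) + 1 = 1 by norm_num, PySem.List.pyRange_one_eq_nil le_rfl]
      simp only [List.foldl_nil]
      refine ⟨by simp [List.length_replicate]; omega, ?_, rfl, ?_, fun j hj1 hj0 => by omega⟩
      · intro j hjn hj0
        match j with
        | j' + 1 =>
            simp only [List.getD_eq_getElem?_getD, List.getElem?_cons_succ, List.getElem?_replicate]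
            split <;> simp
      · intro j v hv
        match j, hv with
        | 0, hv =>
            simp only [List.getD_eq_getElem?_getD, List.getElem?_cons_zero] at hv
            simp at hv
            omega
        | j' + 1, hv =>
            simp only [List.getD_eq_getElem?_getD, List.getElem?_cons_succ, List.getElem?_replicate] at hv
            split at hv <;> simp at hv
  | succ m ih =>
      intro hlt
      have h1 : (1 : Int) ≤ (m : Int) + 1 := by omega
      rw [show (((m + 1 : Nat)) : Int) + 1 = ((m : Int) + 1) + 1 by push_cast; ring,
          PySem.List.pyRange_one_succ_right h1, List.foldl_append]
      simp only [List.foldl_cons, List.foldl_nil]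
      exact pvInv_step n cs m _ hcs (ih (by omega)) hlt

-- A's final check loop returns coins on full success and [] on any failure
theorem pvCheckA_pos (dp : List Int) (rec : List (Option Int)) (cs l : List Int)
    (h : ∀ i ∈ l, dp.getD i.toNat 0 = pvGot (rec.getD i.toNat none)) :
    pvCheckA dp rec cs l = cs := by
  induction l with
  | nil => rfl
  | cons x xs ih =>
      simp only [pvCheckA]
      rw [if_neg (by simpa using h x (by simp))]
      exact ih (fun i hi => h i (by simp [hi]))

theorem pvCheckA_neg (dp : List Int) (rec : List (Option Int)) (cs l : List Int)
    (h : ∃ i ∈ l, dp.getD i.toNat 0 ≠ pvGot (rec.getD i.toNat none)) :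
    pvCheckA dp rec cs l = [] := by
  induction l with
  | nil => simp at h
  | cons x xs ih =>
      simp only [pvCheckA]
      by_cases hx : dp.getD x.toNat 0 ≠ pvGot (rec.getD x.toNat none)
      · rw [if_pos hx]
      · rw [if_neg hx]
        refine ih ?_
        rcases h with ⟨i, hi, hne⟩
        rcases List.mem_cons.mp hi with rfl | hi
        · exact absurd hne hx
        · exact ⟨i, hi, hne⟩

-- the central equivalence: A's recomputed table matches dp iff dp is a fixed point of the recurrence
theorem pass_iff (dp cs : List Int) (n : Nat) (G : Nat → Int)
    (hcs : ∀ c ∈ cs, 1 ≤ c)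
    (h0 : dp.getD 0 0 = 0) (hG0 : G 0 = 0)
    (hGR : ∀ j : Nat, 1 ≤ j → j < n → G j = pvBest G cs j) :
    (∀ j : Nat, j < n → dp.getD j 0 = G j) ↔
    (∀ j : Nat, 1 ≤ j → j < n → dp.getD j 0 = pvBest (fun t => dp.getD t 0) cs j) := by
  constructor
  · intro h j hj1 hjn
    rw [h j hjn, hGR j hj1 hjn]
    exact pvBest_congr G (fun t => dp.getD t 0) cs j hcs
      (fun t ht => (h t (by omega)).symm)
  · intro h j
    induction j using Nat.strong_induction_on with
    | _ j ih =>
      intro hjn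
      match j with
      | 0 => rw [h0, hG0]
      | j' + 1 =>
        rw [h (j' + 1) (by omega) hjn, hGR (j' + 1) (by omega) hjn]
        exact pvBest_congr (fun t => dp.getD t 0) G cs (j' + 1) hcs
          (fun t ht => ih t ht (by omega))

-- ===== B-side lemmas =====
theorem pvRelaxB_true_iff (dp cs : List Int) (n : Int) (l : List Int) :
    pvRelaxB dp cs n l = true ↔
      ∀ i ∈ l, dp.getD i.toNat 0 ≠ -1 → ∀ c ∈ cs, pvViolB dp n i c = false := by
  induction l with
  | nil => exact ⟨fun _ i hi => absurd hi (by simp), fun _ => rfl⟩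
  | cons x xs ih =>
      simp only [pvRelaxB]
      by_cases hx : ((dp.getD x.toNat 0 != -1) && cs.any (fun c => pvViolB dp n x c)) = true
      · rw [if_pos hx]
        have hx' := (Bool.and_eq_true _ _) ▸ hx
        obtain ⟨h1, h2⟩ := hx'
        rcases List.any_eq_true.mp h2 with ⟨c, hc, hv⟩
        constructor
        · intro h; cases h
        · intro h
          have := h x (by simp) (by simpa using h1) c hc
          rw [this] at hv; cases hv
      · rw [if_neg hx, ih]
        constructor
        · intro h i hi hne c hc
          rcases List.mem_cons.mp hi with rfl | hi
          · cases hb : pvViolB dp n i c with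
            | false => rfl
            | true =>
                exact absurd ((Bool.and_eq_true _ _) ▸
                  (⟨by simpa using hne, List.any_eq_true.mpr ⟨c, hc, hb⟩⟩ :
                    (dp.getD i.toNat 0 != -1) = true ∧
                      (cs.any (fun c => pvViolB dp n i c)) = true)) hx
          · exact h i hi hne c hc
        · intro h i hi hne c hc
          exact h i (List.mem_cons_of_mem _ hi) hne c hc

theorem pvTightB_true_iff (dp cs : List Int) (l : List Int) :
    pvTightB dp cs l = true ↔
      ∀ i ∈ l, dp.getD i.toNat 0 ≠ -1 → pvHasWitB dp cs i = true := by
  induction l with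
  | nil => exact ⟨fun _ i hi => absurd hi (by simp), fun _ => rfl⟩
  | cons x xs ih =>
      simp only [pvTightB]
      by_cases hx : ((dp.getD x.toNat 0 != -1) && !(pvHasWitB dp cs x)) = true
      · rw [if_pos hx]
        have hx' := (Bool.and_eq_true _ _) ▸ hx
        obtain ⟨h1, h2⟩ := hx'
        constructor
        · intro h; cases h
        · intro h
          have := h x (by simp) (by simpa using h1)
          rw [this] at h2; cases h2
      · rw [if_neg hx, ih]
        constructor
        · intro h i hi hne
          rcases List.mem_cons.mp hi with rfl | hi
          · cases hb : pvHasWitB dp cs i with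
            | true => rfl
            | false =>
                exact absurd ((Bool.and_eq_true _ _) ▸
                  (⟨by simpa using hne, by simp [hb]⟩ :
                    (dp.getD i.toNat 0 != -1) = true ∧ (!(pvHasWitB dp cs i)) = true)) hx
          · exact h i hi hne
        · intro h i hi hne
          exact h i (List.mem_cons_of_mem _ hi) hne

-- candidate list at amount j, read off dp itself
def pvCand (dp cs : List Int) (j : Nat) : List Int :=
  cs.filterMap (fun c =>
    if c ≤ (j : Int) ∧ dp.getD ((j : Int) - c).toNat 0 ≠ -1
    then some (dp.getD ((j : Int) - c).toNat 0 + 1) else none)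

theorem pvBest_dp_eq (dp cs : List Int) (j : Nat) :
    pvBest (fun t => dp.getD t 0) cs j =
      match PySem.List.min? (pvCand dp cs j) (fun x => x) with
      | some m => m
      | none => -1 := rfl

-- under the fixed-point hypothesis every defined dp value is nonnegative
theorem pvNonneg (dp cs : List Int) (n : Nat) (hcs : ∀ c ∈ cs, 1 ≤ c)
    (h0 : dp.getD 0 0 = 0)
    (hQ : ∀ j : Nat, 1 ≤ j → j < n → dp.getD j 0 = pvBest (fun t => dp.getD t 0) cs j) :
    ∀ j : Nat, j < n → dp.getD j 0 ≠ -1 → 0 ≤ dp.getD j 0 := by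
  intro j
  induction j using Nat.strong_induction_on with
  | _ j ih =>
    intro hjn hne
    match j with
    | 0 => rw [h0]
    | j' + 1 =>
      have h := hQ (j' + 1) (by omega) hjn
      rw [pvBest_dp_eq] at h
      rcases hm : PySem.List.min? (pvCand dp cs (j' + 1)) (fun x => x) with _ | m
      · rw [hm] at h
        have h' : dp.getD (j' + 1) 0 = -1 := h
        exact absurd h' hne
      · rw [hm] at h
        have h' : dp.getD (j' + 1) 0 = m := h
        have hmem := PySem.List.min?_mem hm
        unfold pvCand at hmem
        rcases List.mem_filterMap.mp hmem with ⟨c, hc, hfc⟩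
        by_cases hcond : c ≤ ((j' + 1 : Nat) : Int) ∧ dp.getD (((j' + 1 : Nat) : Int) - c).toNat 0 ≠ -1
        · rw [if_pos hcond] at hfc
          have h1c := hcs c hc
          set t := (((j' + 1 : Nat) : Int) - c).toNat with ht
          have htlt : t < j' + 1 := by omega
          have := ih t htlt (by omega) hcond.2
          have hmv : dp.getD t 0 + 1 = m := by simpa using hfc
          omega
        · rw [if_neg hcond] at hfc; exact absurd hfc (by simp)

-- the certificate (relax + tight) holds iff dp is a fixed point of the recurrence
theorem cert_iff (dp cs : List Int) (n : Nat) (hcs : ∀ c ∈ cs, 1 ≤ c)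
    (h0 : dp.getD 0 0 = 0) :
    ((∀ i : Nat, i < n → dp.getD i 0 ≠ -1 → ∀ c ∈ cs, pvViolB dp (n : Int) (i : Int) c = false) ∧
     (∀ i : Nat, 1 ≤ i → i < n → dp.getD i 0 ≠ -1 → pvHasWitB dp cs (i : Int) = true)) ↔
    (∀ j : Nat, 1 ≤ j → j < n → dp.getD j 0 = pvBest (fun t => dp.getD t 0) cs j) := by
  constructor
  · rintro ⟨hF, hW⟩ j hj1 hjn
    rw [pvBest_dp_eq]
    by_cases hd : dp.getD j 0 = -1
    · -- the candidate list must be empty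
      have hempty : pvCand dp cs j = [] := by
        unfold pvCand
        rw [List.filterMap_eq_nil_iff]
        intro c hc
        by_cases hcond : c ≤ (j : Int) ∧ dp.getD ((j : Int) - c).toNat 0 ≠ -1
        · exfalso
          have h1c := hcs c hc
          set t := ((j : Int) - c).toNat with ht
          have htn : t < n := by omega
          have hv := hF t htn hcond.2 c hc
          have hji : (t : Int) + c = (j : Int) := by omega
          unfold pvViolB at hv
          rw [hji] at hv
          have hjn' : (j : Int) < (n : Int) := by omega
          simp only [Int.toNat_natCast, decide_eq_true hjn', Bool.true_and,
            Bool.or_eq_false_iff] at hv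
          obtain ⟨hv1, hv2⟩ := hv
          rw [hd] at hv1
          simp at hv1
        · rw [if_neg hcond]
      rw [hempty]
      exact hd
    · -- tight gives membership, relax gives minimality
      have hwit := hW j hj1 hjn hd
      unfold pvHasWitB at hwit
      rcases List.any_eq_true.mp hwit with ⟨c0, hc0, hb⟩
      simp only [Bool.and_eq_true, decide_eq_true_eq, bne_iff_ne, beq_iff_eq] at hb
      obtain ⟨⟨hle0, hne0⟩, heq0⟩ := hb
      have hmemd : dp.getD j 0 ∈ pvCand dp cs j := by
        refine List.mem_filterMap.mpr ⟨c0, hc0, ?_⟩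
        rw [if_pos ⟨hle0, hne0⟩, heq0, Int.toNat_natCast]
      have hmin : ∀ y ∈ pvCand dp cs j, dp.getD j 0 ≤ y := by
        intro y hy
        rcases List.mem_filterMap.mp hy with ⟨c, hc, hfc⟩
        by_cases hcond : c ≤ (j : Int) ∧ dp.getD ((j : Int) - c).toNat 0 ≠ -1
        · rw [if_pos hcond] at hfc
          have h1c := hcs c hc
          set t := ((j : Int) - c).toNat with ht
          have htn : t < n := by omega
          have hv := hF t htn hcond.2 c hc
          have hji : (t : Int) + c = (j : Int) := by omega
          unfold pvViolB at hv
          rw [hji] at hv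
          have hjn' : (j : Int) < (n : Int) := by omega
          simp only [Int.toNat_natCast, decide_eq_true hjn', Bool.true_and, Bool.or_eq_false_iff] at hv
          have hle := of_decide_eq_false hv.2
          have hyv : dp.getD t 0 + 1 = y := by simpa using hfc
          omega
        · rw [if_neg hcond] at hfc; exact absurd hfc (by simp)
      rcases hm : PySem.List.min? (pvCand dp cs j) (fun x => x) with _ | m
      · rw [PySem.List.min?_eq_none_iff] at hm
        rw [hm] at hmemd
        exact absurd hmemd (by simp)
      · have hmmem := PySem.List.min?_mem hm
        have h1 : m ≤ dp.getD j 0 := by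
          have := PySem.List.min?_isMin hm
          simpa using this (dp.getD j 0) hmemd
        have h2 : dp.getD j 0 ≤ m := hmin m hmmem
        show dp.getD j 0 = m
        omega
  · intro hQ
    have hnn := pvNonneg dp cs n hcs h0 hQ
    constructor
    · intro i hin hne c hc
      show (decide ((i : Int) + c < (n : Int)) &&
        ((dp.getD ((i : Int) + c).toNat 0 == -1) ||
          decide (dp.getD ((i : Int) + c).toNat 0 > dp.getD ((i : Int)).toNat 0 + 1))) = false
      by_cases hjlt : (i : Int) + c < (n : Int)
      · have h1c := hcs c hc
        set j := ((i : Int) + c).toNat with hj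
        have hj1 : 1 ≤ j := by omega
        have hjn : j < n := by omega
        have hQj := hQ j hj1 hjn
        rw [pvBest_dp_eq] at hQj
        have hmemc : dp.getD i 0 + 1 ∈ pvCand dp cs j := by
          refine List.mem_filterMap.mpr ⟨c, hc, ?_⟩
          have hji : ((j : Nat) : Int) - c = (i : Int) := by omega
          rw [if_pos (by rw [hji]; exact ⟨by omega, by simpa using hne⟩)]
          rw [hji]
          simp
        rcases hm : PySem.List.min? (pvCand dp cs j) (fun x => x) with _ | m
        · rw [PySem.List.min?_eq_none_iff] at hm
          rw [hm] at hmemc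
          exact absurd hmemc (by simp)
        · rw [hm] at hQj
          have hmmem := PySem.List.min?_mem hm
          -- m is a candidate value, hence ≥ 1
          have hm1 : 1 ≤ m := by
            rcases List.mem_filterMap.mp hmmem with ⟨c', hc', hfc'⟩
            by_cases hcond : c' ≤ (j : Int) ∧ dp.getD ((j : Int) - c').toNat 0 ≠ -1
            · rw [if_pos hcond] at hfc'
              have h1c' := hcs c' hc'
              set t := ((j : Int) - c').toNat with ht
              have := hnn t (by omega) hcond.2
              have : dp.getD t 0 + 1 = m := by simpa using hfc'
              omega
            · rw [if_neg hcond] at hfc'; exact absurd hfc' (by simp)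
          have hlem : m ≤ dp.getD i 0 + 1 := by
            have := PySem.List.min?_isMin hm
            simpa using this _ hmemc
          have hjd : dp.getD j 0 = m := hQj
          have hb1 : (m == -1) = false := by simp; omega
          have hb2 : decide (m > dp.getD i 0 + 1) = false := decide_eq_false (by omega)
          have hit : ((i : Int)).toNat = i := by omega
          rw [hjd, hit, hb1, hb2]
          simp
      · simp [hjlt]
    · intro i hi1 hin hne
      have hQi := hQ i hi1 hin
      rw [pvBest_dp_eq] at hQi
      rcases hm : PySem.List.min? (pvCand dp cs i) (fun x => x) with _ | m
      · rw [hm] at hQi; simp at hQi; exact absurd hQi hne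
      · rw [hm] at hQi
        have hmmem := PySem.List.min?_mem hm
        rcases List.mem_filterMap.mp hmmem with ⟨c, hc, hfc⟩
        by_cases hcond : c ≤ (i : Int) ∧ dp.getD ((i : Int) - c).toNat 0 ≠ -1
        · rw [if_pos hcond] at hfc
          unfold pvHasWitB
          refine List.any_eq_true.mpr ⟨c, hc, ?_⟩
          have hit : ((i : Int)).toNat = i := by omega
          simp only [Bool.and_eq_true, decide_eq_true_eq, bne_iff_ne, beq_iff_eq, hit]
          have hQi' : dp.getD i 0 = m := hQi
          exact ⟨⟨hcond.1, hcond.2⟩, by rw [hQi']; simpa using hfc⟩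
        · rw [if_neg hcond] at hfc; exact absurd hfc (by simp)

-- ===== VERDICT (by name: the statement is the Claim_ definition above) =====
theorem inverseCoinChange_spec : Claim_equal_inverseCoinChange := by
  intro dp _
  show inverseCoinChange dp = inverseCoinChange_alt dp
  simp only [inverseCoinChange, inverseCoinChange_alt]
  by_cases hn : dp.length = 0
  · rw [if_pos hn, if_pos (Or.inl hn)]
  · by_cases h0 : dp.getD 0 0 ≠ 0
    · rw [if_neg hn, if_pos h0, if_pos (Or.inr h0)]
    · push Not at h0
      rw [if_neg hn, if_neg (by rw [h0]; simp), if_neg (by rw [h0]; simp [hn])]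
      have hnpos : 0 < dp.length := Nat.pos_of_ne_zero hn
      set n := dp.length with hndef
      set cs := (PySem.List.pyRange 1 (n : Int) 1).filter
        (fun d => decide (dp.getD d.toNat 0 = 1)) with hcsdef
      have hcoins : (PySem.List.pyRange 1 (n : Int) 1).foldl
          (fun acc d => if dp.getD d.toNat 0 = 1 then acc ++ [d] else acc) ([] : List Int) = cs := by
        rw [PySem.List.foldl_append_ite_eq_filter, List.nil_append]
      rw [hcoins]
      have hcs : ∀ c ∈ cs, 1 ≤ c := by
        intro c hc
        have := PySem.List.mem_pyRange_one.mp (List.mem_of_mem_filter hc)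
        omega
      set R := (PySem.List.pyRange 1 (n : Int) 1).foldl
        (fun r i => cs.foldl (pvInnerA i) r)
        (some 0 :: List.replicate (n - 1) none) with hRdef
      have hinv := pvInv_outer n cs hcs hnpos (n - 1) (by omega)
      rw [show (((n - 1 : Nat)) : Int) + 1 = (n : Int) by omega] at hinv
      rw [← hRdef] at hinv
      obtain ⟨hlen, hnone2, hg0, hnn, hrecr⟩ := hinv
      have hG0 : pvG R 0 = 0 := by unfold pvG; rw [hg0]; rfl
      have hGR : ∀ j : Nat, 1 ≤ j → j < n → pvG R j = pvBest (pvG R) cs j :=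
        fun j h1 hj => hrecr j h1 (by omega)
      have hiff := pass_iff dp cs n (pvG R) hcs h0 hG0 hGR
      by_cases hQ : ∀ j : Nat, 1 ≤ j → j < n → dp.getD j 0 = pvBest (fun t => dp.getD t 0) cs j
      · -- both checks pass: both sides return cs
        obtain ⟨hF, hW⟩ := (cert_iff dp cs n hcs h0).mpr hQ
        have hrelax : pvRelaxB dp cs (n : Int) (PySem.List.pyRange 0 (n : Int) 1) = true := by
          rw [pvRelaxB_true_iff]
          intro i hi hne c hc
          have hmem := PySem.List.mem_pyRange_one.mp hi
          have hcast : ((i.toNat : Nat) : Int) = i := by omega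
          rw [← hcast]
          exact hF i.toNat (by omega) hne c hc
        have htight : pvTightB dp cs (PySem.List.pyRange 1 (n : Int) 1) = true := by
          rw [pvTightB_true_iff]
          intro i hi hne
          have hmem := PySem.List.mem_pyRange_one.mp hi
          have hcast : ((i.toNat : Nat) : Int) = i := by omega
          rw [← hcast]
          exact hW i.toNat (by omega) (by omega) hne
        rw [pvCheckA_pos dp R cs _ ?_]
        · simp only [hrelax, htight, if_true]
        · intro i hi
          have hmem := PySem.List.mem_pyRange_one.mp hi
          exact (hiff.mpr hQ) i.toNat (by omega)
      · -- some check fails: both sides return []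
        have hAfail : ∃ i ∈ PySem.List.pyRange 0 (n : Int) 1,
            dp.getD i.toNat 0 ≠ pvGot (R.getD i.toNat none) := by
          by_contra hc
          push Not at hc
          refine hQ (hiff.mp ?_)
          intro j hjn
          have := hc (j : Int) (PySem.List.mem_pyRange_one.mpr (by omega))
          simpa using this
        rw [pvCheckA_neg dp R cs _ hAfail]
        cases hr : pvRelaxB dp cs (n : Int) (PySem.List.pyRange 0 (n : Int) 1) with
        | false => simp
        | true =>
          cases ht : pvTightB dp cs (PySem.List.pyRange 1 (n : Int) 1) with
          | false => simp
          | true =>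
            exfalso
            refine hQ ((cert_iff dp cs n hcs h0).mp ⟨?_, ?_⟩)
            · intro i hin hne c hc
              exact (pvRelaxB_true_iff dp cs (n : Int) _).mp hr (i : Int)
                (PySem.List.mem_pyRange_one.mpr (by omega))
                (by simpa using hne) c hc
            · intro i hi1 hin hne
              exact (pvTightB_true_iff dp cs _).mp ht (i : Int)
                (PySem.List.mem_pyRange_one.mpr (by omega))
                (by simpa using hne)
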